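-- pv_equiv track=rewrite | github.com/WaterH2P/Algorithm | OJ/Ex/Ex_2/Q_4.py | hlt
-- ===== SOURCE A (Python) =====
-- def hlt(n, t1, t2, t3, sumOp):
--     if n == 1 :
--         if t1 == 'a' and t3 == 'c' :
--             sumOp += 2
--         elif t1 == 'c' and t3 == 'a' :
--             sumOp += 2
--         else :
--             sumOp += 1
--         return sumOp
--     else :
--         sumOp = hlt(n-1, t1, t2, t3, sumOp)
--         sumOp = hlt(1, t1, t3, t2, sumOp)
--         sumOp = hlt(n-1, t3, t2, t1, sumOp)
--         sumOp = hlt(1, t2, t1, t3, sumOp)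
--         sumOp = hlt(n-1, t1, t2, t3, sumOp)
--         return sumOp
-- ===== SOURCE B (Python) =====
-- def hlt(n, t1, t2, t3, sumOp):
--     # Closed form: the op-cost of a (first,third) pair is symmetric, so the two
--     # mutually recursive totals coincide and satisfy T(n) = 3*T(n-1) + K.
--     def cost(x, z):
--         return 2 if (x == 'a' and z == 'c') or (x == 'c' and z == 'a') else 1
--     p = 3 ** (n - 1)
--     return sumOp + p * cost(t1, t3) + (cost(t1, t2) + cost(t2, t3)) * (p - 1) // 2
-- ===== Notes on version B (the rewrite author's own statement) =====
-- stated objective: faster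
-- what changed: Replaced the 5-way exponential recursion by a closed form (pair cost is symmetric, so both permutation states satisfy T(n)=3T(n-1)+K, giving sumOp + 3^(n-1)*cost(t1,t3) + K*(3^(n-1)-1)/2); intended as faster: measured 183.97x at n=16 and A times out from n=64 up, which a timing run rule records as unconfirmed.
import Mathlib
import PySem

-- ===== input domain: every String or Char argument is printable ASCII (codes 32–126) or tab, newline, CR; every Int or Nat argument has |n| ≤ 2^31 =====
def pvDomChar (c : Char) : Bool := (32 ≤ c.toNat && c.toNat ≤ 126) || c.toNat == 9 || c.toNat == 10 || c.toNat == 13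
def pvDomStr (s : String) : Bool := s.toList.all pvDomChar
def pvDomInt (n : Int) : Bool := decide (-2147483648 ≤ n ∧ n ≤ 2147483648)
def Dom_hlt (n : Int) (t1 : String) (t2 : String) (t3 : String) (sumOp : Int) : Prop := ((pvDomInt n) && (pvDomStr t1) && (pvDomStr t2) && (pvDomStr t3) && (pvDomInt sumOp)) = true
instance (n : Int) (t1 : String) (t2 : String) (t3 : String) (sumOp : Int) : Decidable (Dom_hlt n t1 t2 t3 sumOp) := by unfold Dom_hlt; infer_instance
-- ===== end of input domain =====

-- B replaces A's exponential 5-call recursion by a closed form (intended as faster; measured 183.97x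
-- at n=16, A times out beyond — recorded as unconfirmed): symmetry of the pair cost collapses the
-- two permutation states into one linear recurrence T(n)=3T(n-1)+K.

-- ===== PORT A =====
-- fuel = n.toNat suffices for every n ≥ 1; fuel 0 is unreachable under Pre_hlt
def hltGo : Nat → Int → String → String → String → Int → Int
  | 0, _, _, _, _, sumOp => sumOp
  | fuel+1, n, t1, t2, t3, sumOp =>
    if n = 1 then
      if t1 = "a" ∧ t3 = "c" then sumOp + 2
      else if t1 = "c" ∧ t3 = "a" then sumOp + 2
      else sumOp + 1
    else
      let s1 := hltGo fuel (n-1) t1 t2 t3 sumOp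
      let s2 := hltGo fuel 1 t1 t3 t2 s1
      let s3 := hltGo fuel (n-1) t3 t2 t1 s2
      let s4 := hltGo fuel 1 t2 t1 t3 s3
      hltGo fuel (n-1) t1 t2 t3 s4

def hlt (n : Int) (t1 : String) (t2 : String) (t3 : String) (sumOp : Int) : Int :=
  hltGo n.toNat n t1 t2 t3 sumOp

-- ===== PORT B =====
def hltCost (x : String) (z : String) : Int :=
  if (x == "a" && z == "c") || (x == "c" && z == "a") then 2 else 1

def hlt_alt (n : Int) (t1 : String) (t2 : String) (t3 : String) (sumOp : Int) : Int :=
  let p : Int := 3 ^ (n - 1).toNat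
  sumOp + p * hltCost t1 t3 + PySem.Int.floordiv ((hltCost t1 t2 + hltCost t2 t3) * (p - 1)) 2

-- ===== PRECONDITION & SPEC =====
-- A recurses on n-1 with base case n == 1 only: for n ≤ 0 the Python recursion never terminates (RecursionError)
def Pre_hlt (n : Int) (t1 : String) (t2 : String) (t3 : String) (sumOp : Int) : Prop := 1 ≤ n
instance (n : Int) (t1 : String) (t2 : String) (t3 : String) (sumOp : Int) : Decidable (Pre_hlt n t1 t2 t3 sumOp) := by unfold Pre_hlt; infer_instance
def pvWitness_hlt : Int × String × String × String × Int := (3, "a", "b", "c", 0)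
def Spec_hlt (n : Int) (t1 : String) (t2 : String) (t3 : String) (sumOp : Int) (out : Int) : Prop := out = hlt_alt n t1 t2 t3 sumOp
instance (n : Int) (t1 : String) (t2 : String) (t3 : String) (sumOp : Int) (out : Int) : Decidable (Spec_hlt n t1 t2 t3 sumOp out) := by unfold Spec_hlt; infer_instance

-- ===== CLAIM (what is proved, stated in full; the proofs are below) =====
def Claim_equal_hlt : Prop := ∀ (n : Int) (t1 : String) (t2 : String) (t3 : String) (sumOp : Int), Dom_hlt n t1 t2 t3 sumOp → Pre_hlt n t1 t2 t3 sumOp → Spec_hlt n t1 t2 t3 sumOp (hlt n t1 t2 t3 sumOp)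

-- ===== LEMMAS AND PROOFS =====

-- linear recurrence value: hltE c13 K m = ops added by hlt (m+1) t1 t2 t3 with c13 = cost(t1,t3), K = cost(t1,t2)+cost(t2,t3)
def hltE (c13 K : Int) : Nat → Int
  | 0 => c13
  | m+1 => 3 * hltE c13 K m + K

theorem hltCost_symm (x z : String) : hltCost x z = hltCost z x := by
  unfold hltCost
  rcases eq_or_ne x "a" with hxa | hxa <;> rcases eq_or_ne x "c" with hxc | hxc <;>
    rcases eq_or_ne z "a" with hza | hza <;> rcases eq_or_ne z "c" with hzc | hzc <;>
    simp_all

theorem hltGo_base (fuel : Nat) (t1 t2 t3 : String) (s : Int) :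
    hltGo (fuel+1) 1 t1 t2 t3 s = s + hltCost t1 t3 := by
  show (if (1:Int) = 1 then _ else _) = _
  rw [if_pos rfl]
  unfold hltCost
  rcases eq_or_ne t1 "a" with h1 | h1 <;> rcases eq_or_ne t1 "c" with h2 | h2 <;>
    rcases eq_or_ne t3 "a" with h3 | h3 <;> rcases eq_or_ne t3 "c" with h4 | h4 <;>
    simp_all

theorem hltGo_spec : ∀ (fuel : Nat) (n : Int) (t1 t2 t3 : String) (s : Int),
    1 ≤ n → n.toNat ≤ fuel →
    hltGo fuel n t1 t2 t3 s = s + hltE (hltCost t1 t3) (hltCost t1 t2 + hltCost t2 t3) (n-1).toNat := by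
  intro fuel
  induction fuel with
  | zero => intro n t1 t2 t3 s h1 h2; omega
  | succ fuel ih =>
    intro n t1 t2 t3 s h1 h2
    rcases eq_or_lt_of_le h1 with heq | hlt2
    · subst n
      simp [hltGo_base, hltE]
    · -- n ≥ 2
      have hne : n ≠ 1 := by omega
      have hm : (n-1).toNat ≤ fuel := by omega
      have h1' : (1:Int) ≤ n - 1 := by omega
      have hf1 : (1:Int).toNat ≤ fuel := by omega
      show (if n = 1 then _ else _) = _
      rw [if_neg hne]
      simp only []
      rw [ih (n-1) t1 t2 t3 s h1' hm,
          ih 1 t1 t3 t2 _ (by omega) hf1,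
          ih (n-1) t3 t2 t1 _ h1' hm,
          ih 1 t2 t1 t3 _ (by omega) hf1,
          ih (n-1) t1 t2 t3 _ h1' hm]
      have e1 : ((1:Int)-1).toNat = 0 := by omega
      have e2 : (n-1).toNat = (n-1-1).toNat + 1 := by omega
      rw [e1, e2]
      simp only [hltE]
      rw [hltCost_symm t3 t1, hltCost_symm t3 t2, hltCost_symm t2 t1]
      ring

theorem hltE_double (c13 K : Int) (m : Nat) :
    2 * hltE c13 K m = 2 * 3 ^ m * c13 + K * (3 ^ m - 1) := by
  induction m with
  | zero => simp [hltE]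
  | succ m ih =>
    simp only [hltE, pow_succ]
    nlinarith [ih]

theorem hltE_closed (c13 K : Int) (m : Nat) :
    hltE c13 K m = 3 ^ m * c13 + PySem.Int.floordiv (K * (3 ^ m - 1)) 2 := by
  have hd := hltE_double c13 K m
  have hK : K * (3 ^ m - 1) = 2 * (hltE c13 K m - 3 ^ m * c13) := by linarith
  rw [hK, PySem.Int.floordiv_eq_ediv_of_pos (by norm_num)]
  omega

-- ===== VERDICT (by name: the statement is the Claim_ definition above) =====
theorem hlt_spec : Claim_equal_hlt := by
  intro n t1 t2 t3 sumOp _ hpre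
  simp only [Spec_hlt, hlt, hlt_alt]
  rw [hltGo_spec n.toNat n t1 t2 t3 sumOp hpre (le_refl _), hltE_closed]
  ring
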